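-- pv_equiv track=rewrite | github.com/yoelcolque/logica | listas/ej1.py | filtrar_primos
-- ===== SOURCE A (Python) =====
-- def es_primo(numero):
--     if numero <= 1:
--         devolver = False
--     elif numero == 2:
--         devolver = True
--     elif numero%2 == 0:
--         devolver = False
--     else:
--         devolver = True
--         contador = 3
--         contador_primo = 0
--         while contador<numero and contador_primo==0:
--             if numero%contador==0:
--                 contador_primo+=1
--                 devolver = False
--             contador += 2
--     return devolver
--
-- def filtrar_primos(numeros, menor_numero):
--     numeros.sort()
--
--     lista_filtrada = []
--     numeros_primos_mayores = 0
--     indice = -1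
--     contador = 1
--     while numeros_primos_mayores < 2 and len(numeros) >= contador:
--         if es_primo(numeros[indice]) and numeros[indice]>menor_numero:
--             numeros_primos_mayores +=1
--             lista_filtrada.append(numeros[indice])
--         indice -= 1
--         contador += 1
--     lista_filtrada.sort()
--     return lista_filtrada
-- ===== SOURCE B (Python) =====
-- def es_primo(numero):
--     if numero <= 1:
--         devolver = False
--     elif numero == 2:
--         devolver = True
--     elif numero%2 == 0:
--         devolver = False
--     else:
--         devolver = True
--         contador = 3
--         contador_primo = 0
--         while contador<numero and contador_primo==0:
--             if numero%contador==0: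
--                 contador_primo+=1
--                 devolver = False
--             contador += 2
--     return devolver
--
-- def filtrar_primos(numeros, menor_numero):
--     numeros.sort()
--     primos = [n for n in numeros if es_primo(n) and n > menor_numero]
--     return primos[-2:]
-- ===== Notes on version B (the rewrite author's own statement) =====
-- stated objective: simpler
-- what changed: Replaces A's count-driven reverse scan with early stopping (negative indices, two counters, a re-sort of the collected pair) by one forward filter of the sorted list followed by a [-2:] slice.
import Mathlib
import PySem

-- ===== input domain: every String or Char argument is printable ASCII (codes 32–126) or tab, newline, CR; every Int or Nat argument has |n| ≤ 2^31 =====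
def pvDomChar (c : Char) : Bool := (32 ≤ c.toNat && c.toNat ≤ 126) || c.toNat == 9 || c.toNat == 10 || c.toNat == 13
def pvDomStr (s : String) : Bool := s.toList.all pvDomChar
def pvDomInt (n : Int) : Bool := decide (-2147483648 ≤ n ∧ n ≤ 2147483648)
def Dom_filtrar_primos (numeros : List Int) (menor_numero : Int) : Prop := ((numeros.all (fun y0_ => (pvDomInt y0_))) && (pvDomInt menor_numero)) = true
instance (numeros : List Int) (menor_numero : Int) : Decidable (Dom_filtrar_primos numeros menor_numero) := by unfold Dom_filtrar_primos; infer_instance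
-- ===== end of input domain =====

-- B replaces A's count-driven reverse scan (negative indices, early stop after two hits,
-- then a re-sort) by one forward filter of the sorted list plus a [-2:] slice: simpler.
-- Both Pythons sort 'numeros' in place; the equivalence proved is about the return value.

-- ===== PORT A =====
-- shared helper es_primo (identical in Source A and Source B); while-loop = well-founded recursion on numero - contador
def es_primo_loop (numero contador contador_primo : Int) (devolver : Bool) : Bool :=
  if h : contador < numero ∧ contador_primo = 0 then
    if PySem.Int.mod numero contador = 0 then
      es_primo_loop numero (contador + 2) (contador_primo + 1) false
    else
      es_primo_loop numero (contador + 2) contador_primo devolver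
  else devolver
termination_by (numero - contador).toNat
decreasing_by all_goals omega

def es_primo (numero : Int) : Bool :=
  if numero ≤ 1 then false
  else if numero = 2 then true
  else if PySem.Int.mod numero 2 = 0 then false
  else es_primo_loop numero 3 0 true

-- A's while loop; 'none' branch of pyGet? is unreachable from the initial state (indice = -contador, contador ≤ len)
def filtrar_primos_loop (numeros : List Int) (menor_numero : Int)
    (numeros_primos_mayores indice contador : Int) (lista_filtrada : List Int) : List Int :=
  if _h : numeros_primos_mayores < 2 ∧ contador ≤ (numeros.length : Int) then
    match PySem.List.pyGet? numeros indice with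
    | none => lista_filtrada
    | some x =>
      if es_primo x = true ∧ x > menor_numero then
        filtrar_primos_loop numeros menor_numero (numeros_primos_mayores + 1) (indice - 1) (contador + 1) (lista_filtrada ++ [x])
      else
        filtrar_primos_loop numeros menor_numero numeros_primos_mayores (indice - 1) (contador + 1) lista_filtrada
  else lista_filtrada
termination_by ((numeros.length : Int) + 1 - contador).toNat
decreasing_by all_goals omega

def filtrar_primos (numeros : List Int) (menor_numero : Int) : List Int :=
  let numeros := PySem.List.sorted numeros (fun x => x) false
  let lista_filtrada := filtrar_primos_loop numeros menor_numero 0 (-1) 1 []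
  PySem.List.sorted lista_filtrada (fun x => x) false

-- ===== PORT B =====
def filtrar_primos_alt (numeros : List Int) (menor_numero : Int) : List Int :=
  let numeros := PySem.List.sorted numeros (fun x => x) false
  let primos := numeros.filter (fun n => es_primo n && decide (n > menor_numero))
  PySem.List.slice primos (some (-2)) none

-- ===== PRECONDITION & SPEC =====
def Spec_filtrar_primos (numeros : List Int) (menor_numero : Int) (out : List Int) : Prop := out = filtrar_primos_alt numeros menor_numero
instance (numeros : List Int) (menor_numero : Int) (out : List Int) : Decidable (Spec_filtrar_primos numeros menor_numero out) := by unfold Spec_filtrar_primos; infer_instance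

-- ===== CLAIM (what is proved, stated in full; the proofs are below) =====
def Claim_equal_filtrar_primos : Prop := ∀ (numeros : List Int) (menor_numero : Int), Dom_filtrar_primos numeros menor_numero → Spec_filtrar_primos numeros menor_numero (filtrar_primos numeros menor_numero)

-- ===== LEMMAS AND PROOFS =====
-- Python's numeros[indice] at a reachable negative index reads the reversed list at position k
lemma pyGet?_neg (s : List Int) (k : Nat) (h : k < s.length) :
    PySem.List.pyGet? s (-((k : Int) + 1)) = some (s.reverse[k]'(by simpa using h)) := by
  simp only [PySem.List.pyGet?, PySem.List.pyIdx?, List.getElem_reverse]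
  rw [if_neg (by omega), if_pos (by omega)]
  have e : s.length - (- -((k : Int) + 1)).toNat = s.length - 1 - k := by omega
  rw [e, Option.bind_some, List.getElem?_eq_getElem (by omega : s.length - 1 - k < s.length)]


-- A's loop from scan position k collects, onto acc, the first (2 - npm) qualifying
-- elements of the reversed sorted list starting at index k.
lemma filtrar_primos_loop_eq (s : List Int) (menor : Int) :
    ∀ (n k : Nat) (npm : Int) (acc : List Int), s.length - k = n → 0 ≤ npm →
      filtrar_primos_loop s menor npm (-((k : Int) + 1)) ((k : Int) + 1) acc
        = acc ++ (((s.reverse.drop k).filter (fun x => es_primo x && decide (x > menor))).take (2 - npm).toNat) := by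
  intro n
  induction n with
  | zero =>
    intro k npm acc hn hnpm
    rw [filtrar_primos_loop]
    rw [dif_neg (by omega)]
    rw [List.drop_of_length_le (by simpa using (by omega : s.length ≤ k))]
    simp
  | succ n ih =>
    intro k npm acc hn hnpm
    have hk : k < s.length := by omega
    rw [filtrar_primos_loop]
    by_cases h2 : npm < 2
    · rw [dif_pos ⟨h2, by omega⟩, pyGet?_neg s k hk]
      dsimp only
      have hd : s.reverse.drop k = s.reverse[k]'(by simpa using hk) :: s.reverse.drop (k+1) := by
        rw [List.drop_eq_getElem_cons (by simpa using hk)]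
      set x := s.reverse[k]'(by simpa using hk) with hx
      by_cases hp : es_primo x = true ∧ x > menor
      · rw [if_pos hp]
        have hrec := ih (k+1) (npm+1) (acc ++ [x]) (by omega) (by omega)
        have e1 : -((k : Int) + 1) - 1 = -(((k+1 : Nat) : Int) + 1) := by push_cast; ring
        have e2 : ((k : Int) + 1) + 1 = (((k+1 : Nat) : Int) + 1) := by push_cast; ring
        rw [e1, e2, hrec, hd]
        rw [List.filter_cons_of_pos (by simp [hp.1, hp.2])]
        have e3 : (2 - npm).toNat = (2 - (npm + 1)).toNat + 1 := by omega
        rw [e3, List.take_succ_cons, List.append_assoc]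
        simp
      · rw [if_neg hp]
        have hrec := ih (k+1) npm acc (by omega) hnpm
        have e1 : -((k : Int) + 1) - 1 = -(((k+1 : Nat) : Int) + 1) := by push_cast; ring
        have e2 : ((k : Int) + 1) + 1 = (((k+1 : Nat) : Int) + 1) := by push_cast; ring
        rw [e1, e2, hrec, hd]
        rw [List.filter_cons_of_neg (by simpa using fun h1 => by simpa [h1] using hp ∘ (fun h2 => ⟨h1, h2⟩))]
    · rw [dif_neg (by omega)]
      have : (2 - npm).toNat = 0 := by omega
      simp [this]

-- ===== VERDICT (by name: the statement is the Claim_ definition above) =====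
theorem filtrar_primos_spec : Claim_equal_filtrar_primos := by
  intro numeros menor _
  show filtrar_primos numeros menor = filtrar_primos_alt numeros menor
  simp only [filtrar_primos, filtrar_primos_alt]
  set s := PySem.List.sorted numeros (fun x => x) false with hs
  have h0 := filtrar_primos_loop_eq s menor s.length 0 0 [] (by omega) (by omega)
  norm_num at h0
  rw [h0]
  set p : Int → Bool := fun n => es_primo n && decide (n > menor) with hp
  set fs := s.filter p with hfs
  rw [PySem.List.slice_from_neg_ofNat fs 2 (by omega)]
  rw [List.take_reverse]
  have hpw : (fs.drop (fs.length - 2)).Pairwise (· ≤ ·) := by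
    apply List.Pairwise.drop
    exact (PySem.List.sorted_pairwise numeros (fun x => x)).filter p
  exact PySem.List.sorted_id_eq_of_perm_of_pairwise _ _ ((fs.drop (fs.length - 2)).reverse_perm).symm hpw
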